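-- pv_equiv track=rewrite | github.com/paiml/depyler | examples/hard_find_pairs.py | count_pair_diffs
-- ===== SOURCE A (Python) =====
-- def count_pair_diffs(arr: list[int], target: int) -> int:
--     """Count pairs (i,j) with i<j where |arr[i]-arr[j]| == target."""
--     n: int = len(arr)
--     count: int = 0
--     i: int = 0
--     while i < n:
--         j: int = i + 1
--         while j < n:
--             diff: int = arr[i] - arr[j]
--             if diff < 0:
--                 diff = -diff
--             if diff == target:
--                 count = count + 1
--             j = j + 1
--         i = i + 1
--     return count
-- ===== SOURCE B (Python) =====
-- def count_pair_diffs(arr: list[int], target: int) -> int: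
--     """Count pairs (i,j) with i<j where |arr[i]-arr[j]| == target."""
--     if target < 0:
--         return 0
--     seen: dict[int, int] = {}
--     count: int = 0
--     for x in arr:
--         count += seen.get(x - target, 0)
--         if target != 0:
--             count += seen.get(x + target, 0)
--         seen[x] = seen.get(x, 0) + 1
--     return count
-- ===== Notes on version B (the rewrite author's own statement) =====
-- stated objective: faster
-- what changed: Replaced the quadratic nested index loops with a single pass that keeps a frequency dict of the elements seen so far and, for each element x, adds the counts of x-target and x+target already seen (target<0 returns 0 immediately).
import Mathlib
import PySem

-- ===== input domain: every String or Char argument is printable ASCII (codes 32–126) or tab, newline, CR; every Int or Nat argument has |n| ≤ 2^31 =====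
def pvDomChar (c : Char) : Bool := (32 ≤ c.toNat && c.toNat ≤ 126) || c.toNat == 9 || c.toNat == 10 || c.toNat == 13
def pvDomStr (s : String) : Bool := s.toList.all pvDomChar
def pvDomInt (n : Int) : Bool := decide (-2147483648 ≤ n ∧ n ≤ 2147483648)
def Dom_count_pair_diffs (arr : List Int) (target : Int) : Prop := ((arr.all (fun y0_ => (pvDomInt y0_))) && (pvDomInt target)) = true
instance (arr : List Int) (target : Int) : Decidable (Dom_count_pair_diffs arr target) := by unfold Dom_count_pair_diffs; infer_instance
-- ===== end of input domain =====

-- B replaces A's quadratic nested index loops by one pass over the list with a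
-- frequency dict of the elements seen so far (asymptotically faster).

-- ===== PORT A =====
-- inner while loop: j runs over the elements after index i
def cpdInner (x target : Int) : List Int → Int → Int
  | [], count => count
  | y :: ys, count =>
    let diff := x - y
    let diff := if diff < 0 then -diff else diff
    cpdInner x target ys (if diff = target then count + 1 else count)

-- outer while loop: i runs over the list
def cpdOuter (target : Int) : List Int → Int → Int
  | [], count => count
  | x :: xs, count => cpdOuter target xs (cpdInner x target xs count)

def count_pair_diffs (arr : List Int) (target : Int) : Int :=
  cpdOuter target arr 0

-- ===== PORT B =====
-- for x in arr: count += seen.get(x-target,0) [+ seen.get(x+target,0) if target≠0]; seen[x] += 1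
def cpdGo (target : Int) : List Int → PySem.Dict Int Int → Int → Int
  | [], _, count => count
  | x :: xs, seen, count =>
    let count := count + seen.getD (x - target) 0
    let count := if target ≠ 0 then count + seen.getD (x + target) 0 else count
    cpdGo target xs (seen.insert x (seen.getD x 0 + 1)) count

def count_pair_diffs_alt (arr : List Int) (target : Int) : Int :=
  if target < 0 then 0 else cpdGo target arr PySem.Dict.empty 0

-- ===== PRECONDITION & SPEC =====
def Spec_count_pair_diffs (arr : List Int) (target : Int) (out : Int) : Prop := out = count_pair_diffs_alt arr target
instance (arr : List Int) (target : Int) (out : Int) : Decidable (Spec_count_pair_diffs arr target out) := by unfold Spec_count_pair_diffs; infer_instance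

-- ===== CLAIM (what is proved, stated in full; the proofs are below) =====
def Claim_equal_count_pair_diffs : Prop := ∀ (arr : List Int) (target : Int), Dom_count_pair_diffs arr target → Spec_count_pair_diffs arr target (count_pair_diffs arr target)

-- ===== LEMMAS AND PROOFS =====

-- |x - y| = t, as A computes it
def pvPred (t x y : Int) : Bool := decide ((if x - y < 0 then -(x - y) else x - y) = t)

-- the number of pairs, counted as A does: each element against its suffix
def pvWithin (t : Int) : List Int → Int
  | [] => 0
  | x :: xs => (xs.countP (pvPred t x) : Int) + pvWithin t xs

-- the prefix counter that B's seen dict holds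
def pvCtr (p : List Int) : PySem.Dict Int Int :=
  p.foldl (fun d x => d.insert x (d.getD x 0 + 1)) PySem.Dict.empty

lemma pvPred_symm (t x y : Int) : pvPred t x y = pvPred t y x := by
  simp only [pvPred, decide_eq_decide]
  split_ifs <;> omega

lemma pvCtr_getD (p : List Int) (v : Int) : (pvCtr p).getD v 0 = (p.count v : Int) := by
  simp [pvCtr, PySem.Dict.getD_foldl_insert_add_one]

lemma pvCtr_append (p : List Int) (x : Int) :
    pvCtr (p ++ [x]) = (pvCtr p).insert x ((pvCtr p).getD x 0 + 1) := by
  simp [pvCtr, List.foldl_append]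

lemma cpdInner_eq (x t : Int) (ys : List Int) (c : Int) :
    cpdInner x t ys c = c + (ys.countP (pvPred t x) : Int) := by
  induction ys generalizing c with
  | nil => simp [cpdInner]
  | cons y ys ih =>
    simp only [cpdInner, ih, List.countP_cons, pvPred, decide_eq_true_eq]
    push_cast
    split_ifs <;> omega

lemma cpdOuter_eq (t : Int) (xs : List Int) (c : Int) :
    cpdOuter t xs c = c + pvWithin t xs := by
  induction xs generalizing c with
  | nil => simp [cpdOuter, pvWithin]
  | cons x xs ih => simp only [cpdOuter, pvWithin, ih, cpdInner_eq]; ring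

lemma pvSumMapIte (q : Int → Bool) (xs : List Int) :
    ((xs.map fun z => if q z then (1:Int) else 0)).sum = (xs.countP q : Int) := by
  induction xs with
  | nil => simp
  | cons w ws ih =>
    simp only [List.map_cons, List.sum_cons, List.countP_cons, ih]
    split_ifs <;> push_cast <;> ring

-- B's per-element increment equals the number of matches in the prefix (for t ≥ 0)
lemma count_split (t x : Int) (ht : 0 ≤ t) (p : List Int) :
    (p.count (x - t) : Int) + (if t ≠ 0 then (p.count (x + t) : Int) else 0)
      = (p.countP (pvPred t x) : Int) := by
  induction p with
  | nil => simp
  | cons y p ih =>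
    simp only [List.count_cons, List.countP_cons, beq_iff_eq, pvPred, decide_eq_true_eq] at ih ⊢
    push_cast at ih ⊢
    split_ifs at ih ⊢ <;> omega

lemma cpdGo_eq (t : Int) (ht : 0 ≤ t) (xs : List Int) (p : List Int) (c : Int) :
    cpdGo t xs (pvCtr p) c
      = c + ((xs.map (fun z => (p.countP (pvPred t z) : Int))).sum + pvWithin t xs) := by
  induction xs generalizing p c with
  | nil => simp [cpdGo, pvWithin]
  | cons x xs ih =>
    simp only [cpdGo]
    rw [← pvCtr_append, ih]
    have hinc : (pvCtr p).getD (x - t) 0 + (if t ≠ 0 then (pvCtr p).getD (x + t) 0 else 0)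
        = (p.countP (pvPred t x) : Int) := by
      rw [pvCtr_getD, pvCtr_getD, ← count_split t x ht p]
    have hmap : ∀ z, ((p ++ [x]).countP (pvPred t z) : Int)
        = (p.countP (pvPred t z) : Int) + (if pvPred t x z then 1 else 0) := by
      intro z
      rw [List.countP_append, pvPred_symm t x z]
      simp only [List.countP_cons, List.countP_nil, Nat.zero_add]
      push_cast
      split_ifs <;> omega
    simp only [hmap, pvWithin, List.map_cons, List.sum_cons]
    rw [List.sum_map_add]
    rw [pvSumMapIte (pvPred t x) xs]
    split_ifs at hinc ⊢ <;> linarith [hinc]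

lemma pvWithin_neg (t : Int) (ht : t < 0) (xs : List Int) : pvWithin t xs = 0 := by
  induction xs with
  | nil => rfl
  | cons x xs ih =>
    simp only [pvWithin, ih, add_zero]
    have : xs.countP (pvPred t x) = 0 := by
      rw [List.countP_eq_zero]
      intro y _
      simp only [pvPred, decide_eq_true_eq]
      split_ifs <;> omega
    simp [this]

-- ===== VERDICT (by name: the statement is the Claim_ definition above) =====
theorem count_pair_diffs_spec : Claim_equal_count_pair_diffs := by
  intro arr t _
  unfold Spec_count_pair_diffs count_pair_diffs count_pair_diffs_alt
  rw [cpdOuter_eq]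
  by_cases ht : t < 0
  · simp [ht, pvWithin_neg t ht]
  · have h0 : 0 ≤ t := by omega
    have := cpdGo_eq t h0 arr [] 0
    simp only [pvCtr, List.foldl_nil] at this
    rw [if_neg ht, this]
    simp
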